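-- pv_equiv track=rewrite | github.com/aparaxsarkar/Generation-of-Fill-in-the-Blank-Questions | 1_TFIDF.py | add_space_before_punctuation
-- ===== SOURCE A (Python) =====
-- import string
-- import string
--
-- def add_space_before_punctuation(input_string):
--     punctuations = set(string.punctuation)
--     modified_string = ''
--
--     for char in input_string:
--         if char in punctuations:
--             modified_string += ' ' + char
--         else:
--             modified_string += char
--
--     return modified_string
-- ===== SOURCE B (Python) =====
-- import string
--
-- def add_space_before_punctuation(input_string):
--     # Staged passes: one global replace per punctuation character.
--     # Correct because the inserted ' ' is not punctuation and the 32
--     # punctuation characters are distinct, so passes never interfere.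
--     for p in string.punctuation:
--         input_string = input_string.replace(p, ' ' + p)
--     return input_string
-- ===== Notes on version B (the rewrite author's own statement) =====
-- stated objective: alternative
-- what changed: Replaces the single Python-level character-by-character scan with an accumulator by 32 staged whole-string str.replace passes, one per punctuation character; correct because the inserted space is not punctuation and the punctuation characters are distinct, so passes do not interfere.
import Mathlib
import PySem

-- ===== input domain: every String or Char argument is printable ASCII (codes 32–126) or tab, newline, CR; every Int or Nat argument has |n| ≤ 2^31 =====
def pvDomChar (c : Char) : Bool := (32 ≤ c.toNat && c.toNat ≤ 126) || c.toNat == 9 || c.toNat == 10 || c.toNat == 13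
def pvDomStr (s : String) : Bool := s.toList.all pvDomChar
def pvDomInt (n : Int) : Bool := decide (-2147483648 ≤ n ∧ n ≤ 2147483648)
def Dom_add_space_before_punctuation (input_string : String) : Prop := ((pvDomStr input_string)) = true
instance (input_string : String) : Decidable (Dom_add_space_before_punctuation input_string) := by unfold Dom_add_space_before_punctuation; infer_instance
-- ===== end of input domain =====

-- B replaces A's single scan-and-accumulate loop by 32 staged whole-string str.replace passes (one per punctuation character); same return value, no speed claim.

-- string.punctuation (shared constant, mirrors Python's string.punctuation)
def pyPunctuation : List Char := "!\"#$%&'()*+,-./:;<=>?@[\\]^_`{|}~".toList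

-- ===== PORT A =====
-- loop: for char in input_string: accumulate ' '+char or char
def add_space_before_punctuation (input_string : String) : String :=
  String.ofList (input_string.toList.foldl
    (fun modified_string char =>
      if pyPunctuation.contains char then modified_string ++ [' ', char]
      else modified_string ++ [char]) [])

-- ===== PORT B =====
-- for p in string.punctuation: input_string = input_string.replace(p, ' ' + p)
def add_space_before_punctuation_alt (input_string : String) : String :=
  pyPunctuation.foldl
    (fun s p => PySem.Str.replace s (String.ofList [p]) (String.ofList [' ', p]))
    input_string

-- ===== PRECONDITION & SPEC =====
def Spec_add_space_before_punctuation (input_string : String) (out : String) : Prop := out = add_space_before_punctuation_alt input_string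
instance (input_string : String) (out : String) : Decidable (Spec_add_space_before_punctuation input_string out) := by unfold Spec_add_space_before_punctuation; infer_instance

-- ===== CLAIM (what is proved, stated in full; the proofs are below) =====
def Claim_equal_add_space_before_punctuation : Prop := ∀ (input_string : String), Dom_add_space_before_punctuation input_string → Spec_add_space_before_punctuation input_string (add_space_before_punctuation input_string)

-- ===== LEMMAS AND PROOFS =====

-- expansion function: characters already processed (members of Q) carry their space
def pvExpand (Q : List Char) (c : Char) : List Char :=
  if c ∈ Q then [' ', c] else [c]

-- A's accumulator loop is the flatMap expansion over the full punctuation set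
theorem foldl_append_flatMap (l : List Char) (acc : List Char) :
    l.foldl (fun m c => if pyPunctuation.contains c then m ++ [' ', c] else m ++ [c]) acc
      = acc ++ l.flatMap (pvExpand pyPunctuation) := by
  induction l generalizing acc with
  | nil => simp
  | cons c t ih =>
    simp only [List.foldl_cons, List.flatMap_cons, ih, pvExpand]
    by_cases h : c ∈ pyPunctuation <;> simp [h]

-- Chars.replace.go with a single-char needle is a flatMap
theorem replace_go_single (p : Char) (new : List Char) :
    ∀ (l : List Char) (fuel : Nat) (acc : List Char), l.length ≤ fuel →
      PySem.Chars.replace.go [p] new fuel l acc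
        = acc.reverse ++ l.flatMap (fun c => if c = p then new else [c]) := by
  intro l
  induction l with
  | nil => intro fuel acc _; cases fuel <;> simp [PySem.Chars.replace.go]
  | cons c t ih =>
    intro fuel acc hle
    cases fuel with
    | zero => simp at hle
    | succ n =>
      simp only [PySem.Chars.replace.go]
      by_cases h : c = p
      · subst h
        have hpre : List.isPrefixOf [c] (c :: t) = true := by simp [List.isPrefixOf]
        rw [hpre]
        simp only [if_true]
        have hd : List.drop [c].length (c :: t) = t := by simp
        rw [hd]
        rw [ih n (new.reverse ++ acc) (by simpa using Nat.le_of_succ_le_succ hle)]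
        simp
      · have : List.isPrefixOf [p] (c :: t) = false := by
          simp [List.isPrefixOf]
          exact fun hh => h hh.symm
        rw [this]
        simp only [Bool.false_eq_true, if_false]
        rw [ih n (c :: acc) (by simpa using Nat.le_of_succ_le_succ hle)]
        simp [h]

-- str.replace with a single-char needle, on char lists
theorem replace_single (p : Char) (new l : List Char) :
    PySem.Chars.replace l [p] new = l.flatMap (fun c => if c = p then new else [c]) := by
  rw [PySem.Chars.replace]
  simp only [List.isEmpty_cons, Bool.false_eq_true, if_false]
  exact replace_go_single p new l l.length [] le_rfl

-- one staged pass extends the processed set by p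
theorem replace_expand (s Q : List Char) (p : Char)
    (hpQ : p ∉ Q) (hps : p ≠ ' ') :
    PySem.Chars.replace (s.flatMap (pvExpand Q)) [p] [' ', p]
      = s.flatMap (pvExpand (Q ++ [p])) := by
  rw [replace_single, List.flatMap_assoc]
  apply List.flatMap_congr
  intro c _
  unfold pvExpand
  by_cases hcQ : c ∈ Q
  · have hcp : c ≠ p := fun h => hpQ (h ▸ hcQ)
    simp [hcQ, hcp, hps.symm]
  · by_cases hcp : c = p
    · subst hcp; simp [hcQ]
    · simp [hcQ, hcp]

-- the whole staged loop, by induction over the remaining punctuation list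
theorem foldl_replace_expand :
    ∀ (P Q : List Char) (s : List Char), P.Nodup → (∀ p ∈ P, p ∉ Q) → ' ' ∉ P →
      P.foldl (fun t p => PySem.Chars.replace t [p] [' ', p]) (s.flatMap (pvExpand Q))
        = s.flatMap (pvExpand (Q ++ P)) := by
  intro P
  induction P with
  | nil => intro Q s _ _ _; simp
  | cons p P ih =>
    intro Q s hnd hQ hsp
    simp only [List.foldl_cons]
    rw [replace_expand s Q p (hQ p (by simp)) (fun h => hsp (h ▸ by simp))]
    rw [ih (Q ++ [p]) s hnd.of_cons
        (fun q hq => by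
          simp only [List.mem_append, List.mem_singleton, not_or]
          exact ⟨fun h => hQ q (by simp [hq]) h, fun h => (List.nodup_cons.mp hnd).1 (h ▸ hq)⟩)
        (fun h => hsp (by simp [h]))]
    simp

-- ===== VERDICT (by name: the statement is the Claim_ definition above) =====
theorem add_space_before_punctuation_spec : Claim_equal_add_space_before_punctuation := by
  intro s _
  show _ = _
  unfold add_space_before_punctuation add_space_before_punctuation_alt
  rw [foldl_append_flatMap]
  have hB : pyPunctuation.foldl
      (fun t p => PySem.Str.replace t (String.ofList [p]) (String.ofList [' ', p])) s
      = String.ofList (pyPunctuation.foldl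
          (fun t p => PySem.Chars.replace t [p] [' ', p]) s.toList) := by
    generalize s = s0
    induction pyPunctuation generalizing s0 with
    | nil => simp
    | cons p P ih =>
      simp only [List.foldl_cons]
      rw [ih]
      congr 1
      simp [PySem.Str.replace]
  rw [hB]
  have hmain := foldl_replace_expand pyPunctuation [] s.toList (by decide) (by simp) (by decide)
  have hid : pvExpand [] = fun c => [c] := by funext c; simp [pvExpand]
  rw [hid, List.flatMap_singleton'] at hmain
  rw [hmain]
  simp
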